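-- pv_equiv track=rewrite | github.com/google-deepmind/additive_cbug | cbug/utils.py | get_full_action_set
-- ===== SOURCE A (Python) =====
-- import itertools
-- from typing import List, Mapping, Tuple, Union
--
-- def get_full_action_set(
--     support_sizes: Mapping[str, int],
--     outcome_variable: str = 'Y',
-- ) -> List[Mapping[str, int]]:
--   """Returns the product actions set."""
--   # Don't include the outcome variable in the action set.
--   sizes = [
--       list(range(support_sizes[var]))
--       for var in support_sizes
--       if var != outcome_variable
--   ]
--   cartesian_product = itertools.product(*sizes)
--   actions = []
--   # Translate tuples of ints into a dictionary.
--   for action in cartesian_product: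
--     actions.append({var: i for var, i in zip(support_sizes.keys(), action)})
--   return actions
-- ===== SOURCE B (Python) =====
-- def get_full_action_set(
--     support_sizes,
--     outcome_variable='Y',
-- ):
--   """Product action set by mixed-radix rank decoding: enumerate ranks 0..total-1
--   and decode each rank into its digit tuple with divmod, instead of enumerating
--   the Cartesian product itself."""
--   keys = list(support_sizes)
--   # radix = number of admissible values of each non-outcome variable (len(range(n)))
--   radices = [max(support_sizes[k], 0) for k in keys if k != outcome_variable]
--   total = 1
--   for r in radices:
--     total *= r
--   actions = []
--   for rank in range(total):
--     rem = rank
--     digits = []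
--     for r in reversed(radices):
--       rem, dg = divmod(rem, r)
--       digits.append(dg)
--     digits.reverse()
--     actions.append(dict(zip(keys, digits)))
--   return actions
-- ===== Notes on version B (the rewrite author's own statement) =====
-- stated objective: alternative
-- what changed: Replaces itertools.product enumeration of pre-materialised range lists with mixed-radix rank decoding: compute total = product of the radices, then for each rank in range(total) decode its digit tuple with a reversed divmod chain, so no product structure is ever built.
import Mathlib
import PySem

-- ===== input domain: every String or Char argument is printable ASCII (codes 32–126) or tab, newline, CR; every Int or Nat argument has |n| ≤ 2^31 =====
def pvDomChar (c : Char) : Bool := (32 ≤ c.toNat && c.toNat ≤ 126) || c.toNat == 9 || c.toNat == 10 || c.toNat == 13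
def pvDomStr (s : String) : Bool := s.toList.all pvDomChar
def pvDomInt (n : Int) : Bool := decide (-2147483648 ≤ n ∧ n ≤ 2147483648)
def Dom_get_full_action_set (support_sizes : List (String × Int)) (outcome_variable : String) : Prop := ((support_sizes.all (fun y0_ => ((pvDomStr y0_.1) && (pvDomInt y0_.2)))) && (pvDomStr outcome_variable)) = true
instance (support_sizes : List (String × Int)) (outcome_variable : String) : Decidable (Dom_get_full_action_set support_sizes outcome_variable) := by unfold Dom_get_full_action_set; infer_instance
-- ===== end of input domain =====

-- B enumerates ranks 0..total-1 and decodes each rank into its digit tuple by mixed-radix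
-- divmod, instead of materialising itertools.product of the ranges; objective: alternative.

-- ===== PORT A =====
-- itertools.product(*sizes), as A consumes it: the list of all tuples, first factor slowest
def pvCartProd : List (List Int) → List (List Int)
  | [] => [[]]
  | l :: ls => l.flatMap (fun x => (pvCartProd ls).map (fun t => x :: t))

-- a Python dict built by inserting zipped (key, value) pairs in order
-- (A's {var: i for var, i in zip(...)} and B's dict(zip(...)) both do exactly this)
def pvDictOfZip (pairs : List (String × Int)) : PySem.Dict String Int :=
  pairs.foldl (fun d p => d.insert p.1 p.2) PySem.Dict.empty

def get_full_action_set (support_sizes : List (String × Int)) (outcome_variable : String) : List (List (String × Int)) :=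
  let d := PySem.Dict.ofList support_sizes
  -- for var in support_sizes: iterates items (lookup support_sizes[var] is exact since dict keys are unique)
  let sizes := (d.items.filter (fun p => p.1 != outcome_variable)).map (fun p => PySem.List.pyRange 0 p.2 1)
  let cartesian_product := pvCartProd sizes
  cartesian_product.foldl (fun actions action => actions ++ [(pvDictOfZip (d.keys.zip action)).items]) []

-- ===== PORT B =====
-- rem, dg = divmod(rem, r) over reversed(radices), appending digits, then digits.reverse()
def pvDecode (radices : List Int) (rank : Int) : List Int :=
  let st := radices.reverse.foldl
      (fun (s : Int × List Int) r => (PySem.Int.floordiv s.1 r, s.2 ++ [PySem.Int.mod s.1 r]))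
      (rank, [])
  st.2.reverse

def get_full_action_set_alt (support_sizes : List (String × Int)) (outcome_variable : String) : List (List (String × Int)) :=
  let d := PySem.Dict.ofList support_sizes
  let keys := d.keys
  let radices := (keys.filter (fun k => k != outcome_variable)).map (fun k => max (d.getD k 0) 0)
  let total := radices.foldl (· * ·) 1
  (PySem.List.pyRange 0 total 1).map
    (fun rank => (pvDictOfZip (keys.zip (pvDecode radices rank))).items)

-- ===== PRECONDITION & SPEC =====
def Spec_get_full_action_set (support_sizes : List (String × Int)) (outcome_variable : String) (out : List (List (String × Int))) : Prop := out = get_full_action_set_alt support_sizes outcome_variable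
instance (support_sizes : List (String × Int)) (outcome_variable : String) (out : List (List (String × Int))) : Decidable (Spec_get_full_action_set support_sizes outcome_variable out) := by unfold Spec_get_full_action_set; infer_instance

-- ===== CLAIM (what is proved, stated in full; the proofs are below) =====
def Claim_equal_get_full_action_set : Prop := ∀ (support_sizes : List (String × Int)) (outcome_variable : String), Dom_get_full_action_set support_sizes outcome_variable → Spec_get_full_action_set support_sizes outcome_variable (get_full_action_set support_sizes outcome_variable)

-- ===== LEMMAS AND PROOFS =====

-- range(n) only depends on max(n, 0)
theorem pv_range_max (v : Int) : PySem.List.pyRange 0 v 1 = PySem.List.pyRange 0 (max v 0) 1 := by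
  rcases le_total 0 v with h | h
  · rw [max_eq_left h]
  · rw [max_eq_right h, PySem.List.pyRange_one_eq_nil h, PySem.List.pyRange_one_eq_nil le_rfl]

-- Both ports derive the same list of ranges from the dict.
theorem pv_sizes_eq (d : PySem.Dict String Int) (hnd : d.keys.Nodup) (out : String) :
    (d.items.filter (fun p => p.1 != out)).map (fun p => PySem.List.pyRange 0 p.2 1)
      = ((d.keys.filter (fun k => k != out)).map (fun k => max (d.getD k 0) 0)).map
          (fun r => PySem.List.pyRange 0 r 1) := by
  have hk : d.keys = d.items.map Prod.fst := rfl
  rw [List.map_map, hk, List.filter_map, List.map_map]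
  refine List.map_congr_left ?_
  intro p hp
  simp only [Function.comp]
  have hmem : p ∈ d.items := List.mem_of_mem_filter hp
  have : d.getD p.1 0 = p.2 := PySem.Dict.getD_of_mem_items d (k := p.1) (v := p.2) hmem hnd 0
  rw [this, ← pv_range_max]

-- the digit accumulator of B's inner fold threads through: digits already collected stay a prefix
theorem pv_fold_acc (l : List Int) : ∀ (a : Int) (ds : List Int),
    l.foldl (fun (s : Int × List Int) r => (PySem.Int.floordiv s.1 r, s.2 ++ [PySem.Int.mod s.1 r])) (a, ds)
      = ((l.foldl (fun (s : Int × List Int) r => (PySem.Int.floordiv s.1 r, s.2 ++ [PySem.Int.mod s.1 r])) (a, [])).1,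
         ds ++ (l.foldl (fun (s : Int × List Int) r => (PySem.Int.floordiv s.1 r, s.2 ++ [PySem.Int.mod s.1 r])) (a, [])).2) := by
  induction l with
  | nil => intro a ds; simp
  | cons r l ih =>
    intro a ds
    simp only [List.foldl_cons]
    rw [ih (PySem.Int.floordiv a r) (ds ++ [PySem.Int.mod a r]),
        ih (PySem.Int.floordiv a r) ([] ++ [PySem.Int.mod a r])]
    simp

-- B's decode peels the LAST radix first
theorem pv_decode_snoc (rs : List Int) (r i : Int) :
    pvDecode (rs ++ [r]) i = pvDecode rs (PySem.Int.floordiv i r) ++ [PySem.Int.mod i r] := by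
  unfold pvDecode
  simp only [List.reverse_append, List.reverse_singleton, List.singleton_append, List.foldl_cons]
  rw [pv_fold_acc]
  simp

theorem pv_decode_nil (i : Int) : pvDecode [] i = [] := by simp [pvDecode]

-- A's product peels the LAST factor into a trailing coordinate
theorem pv_cart_snoc (ls : List (List Int)) (l : List Int) :
    pvCartProd (ls ++ [l]) = (pvCartProd ls).flatMap (fun t => l.map (fun x => t ++ [x])) := by
  induction ls with
  | nil =>
    simp [pvCartProd]
    exact Eq.symm List.map_eq_flatMap
  | cons hd tl ih =>
    simp only [List.cons_append, pvCartProd, ih]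
    simp [List.flatMap_assoc, List.map_flatMap, List.flatMap_map, List.map_map, Function.comp_def]

-- block decomposition of range(P*r): rank = q*r + m
theorem pv_range_block {α : Type} (P r : Int) (hP : 0 ≤ P) (hr : 0 ≤ r) (f : Int → α) :
    (PySem.List.pyRange 0 (P * r) 1).map f
      = (PySem.List.pyRange 0 P 1).flatMap
          (fun q => (PySem.List.pyRange 0 r 1).map (fun m => f (q * r + m))) := by
  obtain ⟨p, rfl⟩ := Int.eq_ofNat_of_zero_le hP
  induction p with
  | zero => simp
  | succ p ih =>
    have h1 : (0:Int) ≤ (p:Int) * r := by positivity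
    have h2 : ((p:Int)) * r ≤ ((p:Int) + 1) * r := by nlinarith
    have hsplit := PySem.List.pyRange_one_append 0 ((p:Int) * r) (((p:Int) + 1) * r) h1 h2
    push_cast
    rw [hsplit, List.map_append, ih (by positivity)]
    have hsucc : PySem.List.pyRange 0 ((p:Int) + 1) 1 = PySem.List.pyRange 0 (p:Int) 1 ++ [(p:Int)] := by
      exact PySem.List.pyRange_one_succ_right (by positivity)
    rw [hsucc, List.flatMap_append]
    congr 1
    -- the last block: pyRange (p*r) ((p+1)*r) = (pyRange 0 r).map (p*r + ·)
    rw [PySem.List.pyRange_one ((p:Int) * r) (((p:Int) + 1) * r),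
        PySem.List.pyRange_one 0 r]
    have : (((p:Int) + 1) * r - (p:Int) * r) = r := by ring
    rw [this]
    simp [List.map_map, Function.comp_def]

-- product of nonnegatives is nonnegative (as B's foldl)
theorem pv_prod_nonneg (rs : List Int) (h : ∀ r ∈ rs, 0 ≤ r) : 0 ≤ rs.foldl (· * ·) 1 := by
  rw [← List.prod_eq_foldl]
  exact List.prod_nonneg h

-- MAIN: decoding the ranks 0..total-1 enumerates exactly the Cartesian product, in order
theorem pv_decode_eq_cart (rs : List Int) (h : ∀ r ∈ rs, 0 ≤ r) :
    (PySem.List.pyRange 0 (rs.foldl (· * ·) 1) 1).map (pvDecode rs)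
      = pvCartProd (rs.map (fun r => PySem.List.pyRange 0 r 1)) := by
  induction rs using List.reverseRecOn with
  | nil =>
    have h1 : PySem.List.pyRange 0 1 1 = [0] := PySem.List.pyRange_one_singleton 0
    simp [pvCartProd, h1, pv_decode_nil]
  | append_singleton rs r ih =>
    have hrs : ∀ x ∈ rs, 0 ≤ x := fun x hx => h x (List.mem_append_left _ hx)
    have hr : 0 ≤ r := h r (by simp)
    have hP : 0 ≤ rs.foldl (· * ·) 1 := pv_prod_nonneg rs hrs
    rw [List.foldl_append]
    simp only [List.foldl_cons, List.foldl_nil]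
    rw [pv_range_block (rs.foldl (· * ·) 1) r hP hr, List.map_append]
    simp only [List.map_cons, List.map_nil]
    rw [pv_cart_snoc, ← ih hrs, List.flatMap_map]
    refine List.flatMap_congr ?_
    intro q _
    refine List.map_congr_left ?_
    intro m hm
    have hmb : 0 ≤ m ∧ m < r := by
      have := (PySem.List.mem_pyRange_one).1 hm
      exact this
    have hrpos : 0 < r := lt_of_le_of_lt hmb.1 hmb.2
    rw [pv_decode_snoc]
    have hdiv : PySem.Int.floordiv (q * r + m) r = q := by
      rw [PySem.Int.floordiv_eq_iff_of_pos hrpos]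
      constructor <;> nlinarith [hmb.1, hmb.2]
    have hmod : PySem.Int.mod (q * r + m) r = m := by
      rw [PySem.Int.mod_eq_emod_of_pos hrpos]
      have hqm : q * r + m = m + q * r := by ring
      rw [hqm, Int.add_mul_emod_self_right]
      exact Int.emod_eq_of_lt hmb.1 hmb.2
    rw [hdiv, hmod]

-- ===== VERDICT (by name: the statement is the Claim_ definition above) =====
theorem get_full_action_set_spec : Claim_equal_get_full_action_set := by
  intro support_sizes outcome_variable _
  unfold Spec_get_full_action_set get_full_action_set get_full_action_set_alt
  set d := PySem.Dict.ofList support_sizes with hd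
  have hnd : d.keys.Nodup := PySem.Dict.nodup_keys_ofList support_sizes
  simp only []
  rw [PySem.List.foldl_append_singleton_eq_map]
  rw [pv_sizes_eq d hnd outcome_variable]
  set radices := (d.keys.filter (fun k => k != outcome_variable)).map (fun k => max (d.getD k 0) 0) with hrad
  have hpos : ∀ r ∈ radices, 0 ≤ r := by
    intro r hr
    rw [hrad] at hr
    obtain ⟨k, _, rfl⟩ := List.mem_map.1 hr
    exact le_max_right _ _
  rw [← pv_decode_eq_cart radices hpos, List.map_map]
  simp [Function.comp_def]
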